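-- pv_equiv track=rewrite | github.com/Zunidzk/cp1404practicals | prac_05/wimbledon.py | number_winners
-- ===== SOURCE A (Python) =====
-- def number_winners(lines):
--     """covert data from lines to calculate winners by using dictionary"""
--     winners = {}
--     for line in lines[1:]:
--         if line[2] in winners:
--             winners[line[2]] += 1
--         else:
--             winners[line[2]] = 1
--     return winners
-- ===== SOURCE B (Python) =====
-- def number_winners(lines):
--     """covert data from lines to calculate winners by using dictionary"""
--     keys = [line[2] for line in lines[1:]]
--
--     def group(ks):
--         if not ks:
--             return {}
--         k = ks[0]
--         rest = [x for x in ks if x != k]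
--         result = {k: len(ks) - len(rest)}
--         result.update(group(rest))
--         return result
--
--     return group(keys)
-- ===== Notes on version B (the rewrite author's own statement) =====
-- stated objective: alternative
-- what changed: Instead of a single pass that increments per-key counts in a dict, B recursively partitions the key list: it takes the first key, removes all its occurrences with a filter, records the count as the length difference, and recurses on the remainder.
import Mathlib
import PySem

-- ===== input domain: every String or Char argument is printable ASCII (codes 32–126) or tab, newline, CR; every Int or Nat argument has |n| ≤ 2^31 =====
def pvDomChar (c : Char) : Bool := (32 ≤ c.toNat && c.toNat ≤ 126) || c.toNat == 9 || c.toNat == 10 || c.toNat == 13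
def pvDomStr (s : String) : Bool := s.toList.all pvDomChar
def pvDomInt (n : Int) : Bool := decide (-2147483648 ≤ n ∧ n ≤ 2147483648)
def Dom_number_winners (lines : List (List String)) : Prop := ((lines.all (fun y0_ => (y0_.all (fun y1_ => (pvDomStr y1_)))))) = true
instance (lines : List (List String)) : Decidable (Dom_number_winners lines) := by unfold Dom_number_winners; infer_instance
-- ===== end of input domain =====

-- B replaces A's incremental dict-of-counts loop by a recursive partition: take the first key,
-- filter out all its occurrences, record the count as the length difference, recurse (objective: alternative).

-- ===== PORT A =====
def number_winners (lines : List (List String)) : List (String × Int) :=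
  ((PySem.List.slice lines (some 1) none).foldl
    (fun winners line =>
      let k := (PySem.List.pyGet? line 2).getD ""   -- line[2]; Pre_ guarantees the index is in range
      if winners.contains k then
        winners.insert k ((winners.get? k).getD 0 + 1)
      else
        winners.insert k 1)
    PySem.Dict.empty).items

-- ===== PORT B =====
-- B's inner recursive function group(ks)
def nwGroup : List String → List (String × Int)
  | [] => []
  | k :: t =>
    let rest := (k :: t).filter (fun x => x != k)
    (k, ((k :: t).length : Int) - (rest.length : Int)) :: nwGroup rest
  termination_by ks => ks.length
  decreasing_by
    simp only [List.filter_cons, bne_self_eq_false, List.length_cons]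
    exact Nat.lt_succ_of_le (List.length_filter_le _ _)

def number_winners_alt (lines : List (List String)) : List (String × Int) :=
  let keys := (PySem.List.slice lines (some 1) none).map
    (fun line => (PySem.List.pyGet? line 2).getD "")   -- line[2]; Pre_ guarantees the index is in range
  nwGroup keys

-- ===== PRECONDITION & SPEC =====
-- Pre_ excludes exactly the inputs on which Python A raises IndexError: a data line shorter than 3.
def Pre_number_winners (lines : List (List String)) : Prop :=
  ∀ line ∈ lines.drop 1, 3 ≤ line.length
instance (lines : List (List String)) : Decidable (Pre_number_winners lines) := by
  unfold Pre_number_winners; infer_instance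
def pvWitness_number_winners : List (List String) :=
  [["year", "champ", "country"], ["2016", "Murray", "GBR"], ["2017", "Federer", "SUI"], ["2018", "Djokovic", "SRB"], ["2019", "Djokovic", "SRB"]]
def Spec_number_winners (lines : List (List String)) (out : List (String × Int)) : Prop := out = number_winners_alt lines
instance (lines : List (List String)) (out : List (String × Int)) : Decidable (Spec_number_winners lines out) := by unfold Spec_number_winners; infer_instance

-- ===== CLAIM (what is proved, stated in full; the proofs are below) =====
def Claim_equal_number_winners : Prop := ∀ (lines : List (List String)), Dom_number_winners lines → Pre_number_winners lines → Spec_number_winners lines (number_winners lines)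

-- ===== LEMMAS AND PROOFS =====

-- A's if/else branch pair is one counter update: on a fresh key getD gives the default 0.
theorem number_winners_body_eq :
    (fun (winners : PySem.Dict String Int) (line : List String) =>
      let k := (PySem.List.pyGet? line 2).getD ""
      if winners.contains k then
        winners.insert k ((winners.get? k).getD 0 + 1)
      else
        winners.insert k 1)
    = (fun (winners : PySem.Dict String Int) (line : List String) =>
        winners.insert ((PySem.List.pyGet? line 2).getD "")
          (winners.getD ((PySem.List.pyGet? line 2).getD "") 0 + 1)) := by
  funext winners line
  by_cases h : winners.contains ((PySem.List.pyGet? line 2).getD "")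
  · simp [h, PySem.Dict.getD]
  · simp [h, PySem.Dict.getD_of_not_contains winners 0 (by simpa using h)]

-- A's counter loop over the slice is Counter(keys) for the mapped-out key list
theorem number_winners_fold_counter (S : List (List String)) :
    S.foldl (fun d line => d.insert ((PySem.List.pyGet? line 2).getD "")
        (d.getD ((PySem.List.pyGet? line 2).getD "") 0 + 1)) PySem.Dict.empty
    = PySem.Dict.counter (S.map (fun line => (PySem.List.pyGet? line 2).getD "")) := by
  rw [← PySem.Dict.foldl_insert_getD_add_one_eq_counter, List.foldl_map]

-- folding Set.add from a seed containing k ignores occurrences of k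
theorem foldl_add_filter_mem (t : List String) :
    ∀ (s : PySem.Set String) (k : String), k ∈ s →
      t.foldl PySem.Set.add s = (t.filter (fun x => x != k)).foldl PySem.Set.add s := by
  induction t with
  | nil => intro s k hk; rfl
  | cons x t ih =>
    intro s k hk
    by_cases hx : x = k
    · subst hx
      have hc : PySem.Set.add s x = s := by
        simpa [PySem.Set.add] using hk
      simp only [List.filter_cons, bne_self_eq_false, List.foldl_cons, hc]
      exact ih s x hk
    · have hmem : k ∈ PySem.Set.add s x := by
        simp only [PySem.Set.add]; split <;> simp [hk]
      simp only [List.filter_cons, List.foldl_cons,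
        show (x != k) = true by simpa using hx]
      exact ih _ k hmem

-- folding Set.add from seed (k :: s) when k never occurs just carries k in front
theorem foldl_add_cons_not_mem (t : List String) :
    ∀ (s : PySem.Set String) (k : String), (∀ y ∈ t, y ≠ k) →
      t.foldl PySem.Set.add (k :: s) = k :: t.foldl PySem.Set.add s := by
  induction t with
  | nil => intro s k _; rfl
  | cons y t ih =>
    intro s k hne
    have hy : y ≠ k := hne y (by simp)
    have hstep : PySem.Set.add (k :: s) y = k :: PySem.Set.add s y := by
      have hcc : PySem.Set.contains (k :: s) y = PySem.Set.contains s y := by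
        simp [PySem.Set.contains, hy]
      simp only [PySem.Set.add, hcc]
      split <;> simp
    simp only [List.foldl_cons, hstep]
    exact ih _ k (fun z hz => hne z (by simp [hz]))

-- first-seen dedup peels off its head together with all its later occurrences
theorem ofList_cons_filter (k : String) (t : List String) :
    PySem.Set.ofList (k :: t) = k :: PySem.Set.ofList (t.filter (fun x => x != k)) := by
  have h0 : PySem.Set.ofList (k :: t) = t.foldl PySem.Set.add [k] := by
    simp [PySem.Set.ofList_eq_foldl, PySem.Set.add]
  rw [h0, foldl_add_filter_mem t [k] k (by simp)]
  rw [foldl_add_cons_not_mem _ [] k (by intro y hy; have := List.of_mem_filter hy; simpa using this)]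
  simp [PySem.Set.ofList_eq_foldl]

-- filtering out one value preserves the count of every other value
theorem count_filter_ne (t : List String) (k x : String) (hx : x ≠ k) :
    (t.filter (fun y => y != k)).count x = t.count x := by
  rw [List.count_filter]
  simp [hx]

-- one value's occurrences + what survives filtering it out = the whole list
theorem count_add_length_filter (k : String) (l : List String) :
    l.count k + (l.filter (fun x => x != k)).length = l.length := by
  induction l with
  | nil => simp
  | cons y l ih =>
    by_cases hy : y = k
    · subst hy
      simp only [List.count_cons, List.filter_cons, bne_self_eq_false, Bool.false_eq_true,
        if_false, List.length_cons, BEq.rfl, if_true]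
      omega
    · simp only [List.count_cons, List.filter_cons,
        show (y != k) = true by simpa using hy, if_true, List.length_cons,
        show (y == k) = false by simpa using hy, Bool.false_eq_true, if_false]
      omega

-- B's recursive partition computes Counter-as-items for the key list
theorem nwGroup_eq_counter_items (ks : List String) :
    nwGroup ks = (PySem.Set.ofList ks).map (fun k => (k, (ks.count k : Int))) := by
  induction hn : ks.length using Nat.strong_induction_on generalizing ks with
  | _ n ih =>
    match ks with
    | [] => simp [nwGroup]
    | k :: t =>
      rw [nwGroup, ofList_cons_filter]
      have hrest : (k :: t).filter (fun x => x != k) = t.filter (fun x => x != k) := by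
        simp
      have hlen : (t.filter (fun x => x != k)).length < n := by
        subst hn
        simp only [List.length_cons]
        exact Nat.lt_succ_of_le (List.length_filter_le _ _)
      rw [hrest, ih _ hlen _ rfl]
      simp only [List.map_cons, List.cons.injEq]
      constructor
      · -- head: length difference = count of k
        refine congrArg (Prod.mk k) ?_
        have h := count_add_length_filter k t
        have hck : (k :: t).count k = t.count k + 1 := by simp
        rw [hck]
        simp only [List.length_cons]
        omega
      · -- tail: counts agree for keys ≠ k
        apply List.map_congr_left
        intro x hx
        have hxmem : x ∈ t.filter (fun y => y != k) := by
          rw [PySem.Set.mem_ofList] at hx; exact hx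
        have hxne : x ≠ k := by
          have := List.of_mem_filter hxmem; simpa using this
        refine congrArg (Prod.mk x) ?_
        rw [count_filter_ne t k x hxne]
        simp [Ne.symm hxne]

-- ===== VERDICT (by name: the statement is the Claim_ definition above) =====
theorem number_winners_spec : Claim_equal_number_winners := by
  intro lines _ _
  unfold Spec_number_winners number_winners number_winners_alt
  rw [number_winners_body_eq, number_winners_fold_counter, PySem.Dict.items_counter]
  rw [nwGroup_eq_counter_items]
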